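-- pv_equiv track=rewrite | github.com/GreenleafLab/amplicon-smf | workflow/scripts/classify_single_molecule_binding_v2_carosversion.py | sublist_finder
-- ===== SOURCE A (Python) =====
-- def find_first_matching_sublist(lst, span, start):
--     '''
--     helper function for below
--     basically, given a start position, figure out the first subsequent position that satisfies the run being in the range
--     returns the index of this position, or else returns -1 if it falls off the end
--     '''
--     min_span, max_span = span
--
--     end = start
--
--     while end < len(lst):
--         temp_span = lst[end] - lst[start] + 1 # fencepost
--         if temp_span >= min_span and temp_span <= max_span:
--             return end
--         else:
--             end += 1
--
--     return -1
--
-- def sublist_finder(lst, span, start_ptr):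
--     '''
--     generic function to compute all possible valid runs of a given length from a list of integers
--     input is a lst of positive integers (no duplicates, sorted)
--     also a range (low and high for how long the run can be, in the units of the entries of the list)
--     also a start (since this is a recursive function)
--     each valid configuration is a list of tuples of (start,end) of valid runs (so a single output could be [] or [(1,150)] or [(1,150),(161,300)])
--     output is a list of these lists
--     '''
--     valid_substrings = []
--
--     start = start_ptr
--
--     while start < len(lst):
--         # from start, find a valid range that works
--         end = find_first_matching_sublist(lst, span, start)
--         if end != -1:
--             # save this tuple
--             temp_sublist = [(lst[start],lst[end])]
--             # recursive call, starting from one past the end of the current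
--             # note, can make this end+2 to ensure that the model inserts one accessible base between nucs for spacer, not sure if necessary
--             recursive_valid_sublists = sublist_finder(lst, span, end+1)
--             # append the empty run (so that we can get the "just this on run" state)
--             # probably not the best way to do it but whatever
--             recursive_valid_sublists += [[]]
--             # add the current run to every recursive one
--             for sublist in recursive_valid_sublists:
--                 valid_substrings.append(temp_sublist + sublist)
--         # now start at the next element in the sequnce
--         start += 1
--
--     # only once, append the empty run
--     if start_ptr == 0:
--         valid_substrings += [[]]
--
--     return valid_substrings
-- ===== SOURCE B (Python) =====
-- def sublist_finder(lst, span, start_ptr):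
--     # Bottom-up DP, memoized by start index: g[i] enumerates every valid run
--     # configuration that uses only indices >= i; built right-to-left, only down
--     # to the first index actually needed.
--     n = len(lst)
--     min_span, max_span = span
--     lo = start_ptr if start_ptr > 0 else 0
--     g = {n: []}
--     for i in range(n - 1, lo - 1, -1):
--         base = lst[i]
--         lo_v = base + min_span - 1
--         hi_v = base + max_span - 1
--         e = -1
--         for j in range(i, n):
--             v = lst[j]
--             if lo_v <= v <= hi_v:
--                 e = j
--                 break
--         if e < 0:
--             g[i] = g[i + 1]
--         else:
--             head = (base, lst[e])
--             g[i] = [[head] + s for s in g[e + 1]] + [[head]] + g[i + 1]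
--     res = g[lo] if start_ptr < n else []
--     return res + [[]] if start_ptr == 0 else list(res)
-- ===== Notes on version B (the rewrite author's own statement) =====
-- stated objective: faster
-- what changed: Replaces A's top-down recursion (which re-enumerates the same suffix subproblem once per caller) by a bottom-up DP table g(i) built right-to-left from the first index needed, so each suffix enumeration is computed once and reused; intended as faster — measured 2.2-2.5x at each size both finished, though the probe could not confirm it at the largest size (both timed out on some inputs).
-- outside the precondition, e.g. on sublist_finder([0, 1], (0, 0), -1): A returns [[(1, 0)]], B returns []
import Mathlib
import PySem

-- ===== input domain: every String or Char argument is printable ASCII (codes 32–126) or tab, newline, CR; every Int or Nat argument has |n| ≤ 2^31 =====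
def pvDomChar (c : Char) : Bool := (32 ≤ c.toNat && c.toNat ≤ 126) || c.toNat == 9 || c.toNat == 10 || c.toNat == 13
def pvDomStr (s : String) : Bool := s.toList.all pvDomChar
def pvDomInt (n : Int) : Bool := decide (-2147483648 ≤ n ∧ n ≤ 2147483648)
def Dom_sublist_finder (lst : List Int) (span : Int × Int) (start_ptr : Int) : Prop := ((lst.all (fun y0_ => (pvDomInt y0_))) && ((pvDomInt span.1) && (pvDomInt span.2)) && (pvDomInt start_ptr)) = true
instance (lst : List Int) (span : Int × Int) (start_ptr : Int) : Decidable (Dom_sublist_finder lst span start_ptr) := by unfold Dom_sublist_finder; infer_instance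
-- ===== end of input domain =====

-- ===== PORT A =====
-- B replaces A's top-down recursion by a bottom-up DP table; proved equal for start_ptr >= 0.

-- port of find_first_matching_sublist's while loop ('-1' is rendered as 'none')
def findFirst (lst : List Int) (span : Int × Int) (start : Int) (e : Int) : Option Int :=
  if _h : e < (lst.length : Int) then
    let temp_span := PySem.List.pyGetD lst e 0 - PySem.List.pyGetD lst start 0 + 1
    if span.1 ≤ temp_span ∧ temp_span ≤ span.2 then some e
    else findFirst lst span start (e + 1)
  else none
termination_by ((lst.length : Int) - e).toNat
decreasing_by omega

-- needed (by name) for sfLoop's termination: a found index lies in [start, len)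
theorem findFirst_bounds (lst : List Int) (span : Int × Int) (start : Int) :
    ∀ e r, findFirst lst span start e = some r → e ≤ r ∧ r < (lst.length : Int) := by
  intro e r h
  fun_induction findFirst lst span start e with
  | case1 e he d hif => simp at h; omega
  | case2 e he d hif ih => have := ih h; omega
  | case3 e he => simp at h

-- port of A's while loop over 'start'; the recursive call sublist_finder(lst, span, end+1)
-- is inlined as 'sfLoop … (e+1) ++ (if e+1 = 0 then [[]] else [])' (= the callee's final append)
def sfLoop (lst : List Int) (span : Int × Int) (start : Int) : List (List (Int × Int)) :=
  if _h : start < (lst.length : Int) then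
    match hF : findFirst lst span start start with
    | some e =>
        let recursive_valid_sublists := sfLoop lst span (e + 1) ++ (if e + 1 = 0 then [[]] else [])
        ((recursive_valid_sublists ++ [[]]).map
            (fun sublist => (PySem.List.pyGetD lst start 0, PySem.List.pyGetD lst e 0) :: sublist))
          ++ sfLoop lst span (start + 1)
    | none => sfLoop lst span (start + 1)
  else []
termination_by ((lst.length : Int) - start).toNat
decreasing_by
  · have := findFirst_bounds lst span start start e hF; omega
  · omega
  · omega

def sublist_finder (lst : List Int) (span : Int × Int) (start_ptr : Int) : List (List (Int × Int)) :=
  sfLoop lst span start_ptr ++ (if start_ptr = 0 then [[]] else [])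

-- ===== PORT B =====
-- port of B's inner 'for j in range(i, n): … break' scan ('e = -1' rendered as none)
def scanFirst (lst : List Int) (loV hiV : Int) (j : Nat) : Option Nat :=
  if h : j < lst.length then
    if loV ≤ lst[j] ∧ lst[j] ≤ hiV then some j else scanFirst lst loV hiV (j + 1)
  else none
termination_by lst.length - j

-- port of B's main loop. B's dict g has the consecutive integer keys i..n, so it is kept
-- here as the list [g(i), …, g(n)]: 'g[m]' reads as '.getD (m - i) []'; after k iterations
-- the list is [g(n-k), …, g(n)]
def buildTable (lst : List Int) (minS maxS : Int) : Nat → List (List (List (Int × Int)))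
  | 0 => [[]]
  | k + 1 =>
    let t := buildTable lst minS maxS k
    let i := lst.length - (k + 1)
    let base := lst.getD i 0
    let gi :=
      match scanFirst lst (base + minS - 1) (base + maxS - 1) i with
      | none => t.headD []
      | some e =>
          ((t.getD (e - i) []).map (fun s => (base, lst.getD e 0) :: s))
            ++ [[(base, lst.getD e 0)]] ++ t.headD []
    gi :: t

-- 'lo = start_ptr if start_ptr > 0 else 0' is ported with .toNat (exact for 0 ≤ start_ptr, all of
-- Pre_); 'g[lo]' is the head of the list
def sublist_finder_alt (lst : List Int) (span : Int × Int) (start_ptr : Int) : List (List (Int × Int)) :=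
  let lo : Nat := if 0 < start_ptr then start_ptr.toNat else 0
  let t := buildTable lst span.1 span.2 (lst.length - lo)
  let res := if start_ptr < (lst.length : Int) then t.headD [] else []
  if start_ptr = 0 then res ++ [[]] else res

-- ===== PRECONDITION & SPEC =====
-- Pre_ excludes negative start_ptr: there A raises IndexError (start_ptr < -len(lst), or an empty
-- lst), or returns values assembled through Python's accidental negative-index wraparound on this
-- recursive entry point, which is never called with a negative index by its own recursion.
def Pre_sublist_finder (lst : List Int) (span : Int × Int) (start_ptr : Int) : Prop :=
  0 ≤ start_ptr
instance (lst : List Int) (span : Int × Int) (start_ptr : Int) : Decidable (Pre_sublist_finder lst span start_ptr) := by unfold Pre_sublist_finder; infer_instance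

def pvWitness_sublist_finder : List Int × (Int × Int) × Int := ([1, 3, 4], (1, 2), 0)

def Spec_sublist_finder (lst : List Int) (span : Int × Int) (start_ptr : Int) (out : List (List (Int × Int))) : Prop := out = sublist_finder_alt lst span start_ptr
instance (lst : List Int) (span : Int × Int) (start_ptr : Int) (out : List (List (Int × Int))) : Decidable (Spec_sublist_finder lst span start_ptr out) := by unfold Spec_sublist_finder; infer_instance

-- ===== CLAIM (what is proved, stated in full; the proofs are below) =====
def Claim_equal_sublist_finder : Prop := ∀ (lst : List Int) (span : Int × Int) (start_ptr : Int), Dom_sublist_finder lst span start_ptr → Pre_sublist_finder lst span start_ptr → Spec_sublist_finder lst span start_ptr (sublist_finder lst span start_ptr)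

-- ===== LEMMAS AND PROOFS =====

-- the two first-match scans agree (A's over Int indices, B's over Nat indices)
theorem scan_eq (lst : List Int) (span : Int × Int) (i : Nat) :
    ∀ fuel j, lst.length ≤ j + fuel →
      findFirst lst span (i : Int) (j : Int)
        = (scanFirst lst (lst.getD i 0 + span.1 - 1) (lst.getD i 0 + span.2 - 1) j).map
            (fun n : Nat => (n : Int)) := by
  intro fuel
  induction fuel with
  | zero =>
    intro j hj
    rw [findFirst, scanFirst]
    simp only [dif_neg (by omega : ¬ j < lst.length),
      dif_neg (by omega : ¬ (j : Int) < (lst.length : Int))]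
    rfl
  | succ f ih =>
    intro j hj
    by_cases hjl : j < lst.length
    · rw [findFirst, scanFirst]
      simp only [dif_pos hjl, dif_pos (by exact_mod_cast Int.ofNat_lt.mpr hjl :
        (j : Int) < (lst.length : Int))]
      have hget : PySem.List.pyGetD lst (j : Int) 0 = lst[j] := by
        rw [PySem.List.pyGetD_natCast]; simp [List.getD, hjl]
      have hgi : PySem.List.pyGetD lst (i : Int) 0 = lst.getD i 0 := by
        rw [PySem.List.pyGetD_natCast]
      rw [hget, hgi]
      by_cases hc : span.1 ≤ lst[j] - lst.getD i 0 + 1 ∧ lst[j] - lst.getD i 0 + 1 ≤ span.2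
      · rw [if_pos hc, if_pos (by omega : lst.getD i 0 + span.1 - 1 ≤ lst[j] ∧ lst[j] ≤ lst.getD i 0 + span.2 - 1)]
        rfl
      · rw [if_neg hc, if_neg (by omega : ¬ (lst.getD i 0 + span.1 - 1 ≤ lst[j] ∧ lst[j] ≤ lst.getD i 0 + span.2 - 1))]
        have := ih (j + 1) (by omega)
        push_cast at this ⊢
        exact this
    · rw [findFirst, scanFirst]
      simp only [dif_neg hjl,
        dif_neg (by omega : ¬ (j : Int) < (lst.length : Int))]
      rfl

theorem sfLoop_of_ge (lst : List Int) (span : Int × Int) (start : Int)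
    (h : ¬ start < (lst.length : Int)) : sfLoop lst span start = [] := by
  rw [sfLoop]; simp [h]

-- non-dependent unfolding equations for sfLoop (its match carries an equation binder for termination)
theorem sfLoop_eq_none (lst : List Int) (span : Int × Int) (start : Int)
    (h : start < (lst.length : Int)) (hF : findFirst lst span start start = none) :
    sfLoop lst span start = sfLoop lst span (start + 1) := by
  rw [sfLoop, dif_pos h]
  split
  · rename_i e' hF'
    rw [hF] at hF'
    cases hF'
  · rfl

theorem sfLoop_eq_some (lst : List Int) (span : Int × Int) (start e : Int)
    (h : start < (lst.length : Int)) (hF : findFirst lst span start start = some e) :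
    sfLoop lst span start =
      (((sfLoop lst span (e + 1) ++ (if e + 1 = 0 then [[]] else [])) ++ [[]]).map
        (fun s => (PySem.List.pyGetD lst start 0, PySem.List.pyGetD lst e 0) :: s))
        ++ sfLoop lst span (start + 1) := by
  rw [sfLoop, dif_pos h]
  split
  · rename_i e' hF'
    rw [hF] at hF'
    injection hF' with he'
    subst he'
    rfl
  · rename_i hF'
    rw [hF] at hF'
    cases hF'

-- the DP table is exactly the suffix values of A's loop
theorem buildTable_eq (lst : List Int) (span : Int × Int) :
    ∀ k, k ≤ lst.length →
      buildTable lst span.1 span.2 k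
        = (List.range (k + 1)).map (fun j => sfLoop lst span ((lst.length - k + j : Nat) : Int)) := by
  intro k
  induction k with
  | zero =>
    intro _
    simp [buildTable, List.range_succ, sfLoop_of_ge lst span ((lst.length : Nat) : Int) (by omega)]
  | succ k ih =>
    intro hk
    have hk' : k ≤ lst.length := by omega
    have ht := ih hk'
    rw [buildTable]
    rw [List.range_succ_eq_map, List.map_cons, List.map_map]
    have htail : (List.range (k + 1)).map ((fun j => sfLoop lst span ((lst.length - (k + 1) + j : Nat) : Int)) ∘ Nat.succ)
        = (List.range (k + 1)).map (fun j => sfLoop lst span ((lst.length - k + j : Nat) : Int)) := by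
      apply List.map_congr_left
      intro j hj
      simp only [Function.comp]
      congr 2
      omega
    rw [htail, ← ht]
    congr 1
    simp only [Nat.add_zero]
    have hhead : (buildTable lst span.1 span.2 k).headD []
        = sfLoop lst span ((lst.length - k : Nat) : Int) := by
      rw [ht]; simp [List.range_succ_eq_map]
    have hscan := scan_eq lst span (lst.length - (k + 1)) (lst.length + 1) (lst.length - (k + 1)) (by omega)
    have hlt : ((lst.length - (k + 1) : Nat) : Int) < (lst.length : Int) := by omega
    cases hsc : scanFirst lst (lst.getD (lst.length - (k + 1)) 0 + span.1 - 1) (lst.getD (lst.length - (k + 1)) 0 + span.2 - 1) (lst.length - (k + 1)) with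
    | none =>
      rw [hsc] at hscan
      simp only [Option.map_none] at hscan
      rw [sfLoop_eq_none lst span _ hlt hscan]
      refine hhead.trans ?_
      congr 1
      omega
    | some e =>
      rw [hsc] at hscan
      simp only [Option.map_some] at hscan
      have hbnd := findFirst_bounds lst span _ _ _ hscan
      have he1 : lst.length - (k + 1) ≤ e ∧ e < lst.length :=
        ⟨by exact_mod_cast hbnd.1, by exact_mod_cast hbnd.2⟩
      rw [sfLoop_eq_some lst span _ _ hlt hscan]
      have hne : ¬ ((e : Int) + 1 = 0) := by omega
      rw [if_neg hne, List.append_nil, List.map_append]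
      have hgetd : (buildTable lst span.1 span.2 k).getD (e - (lst.length - (k + 1))) []
          = sfLoop lst span ((e + 1 : Nat) : Int) := by
        rw [ht]
        have helt : e - (lst.length - (k + 1)) < k + 1 := by omega
        rw [List.getD_eq_getElem _ _ (by simpa using helt)]
        simp only [List.getElem_map, List.getElem_range]
        congr 2
        omega
      have hga : PySem.List.pyGetD lst ((lst.length - (k + 1) : Nat) : Int) 0
          = lst.getD (lst.length - (k + 1)) 0 := by
        rw [PySem.List.pyGetD_natCast]
      have hge : PySem.List.pyGetD lst ((e : Nat) : Int) 0 = lst.getD e 0 := by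
        rw [PySem.List.pyGetD_natCast]
      have hcast : (e : Int) + 1 = ((e + 1 : Nat) : Int) := by omega
      have hstep : ((lst.length - (k + 1) : Nat) : Int) + 1 = ((lst.length - k : Nat) : Int) := by
        omega
      rw [hcast, hstep, ← hgetd, ← hhead] at *
      simp [hga, hge]

-- ===== VERDICT (by name: the statement is the Claim_ definition above) =====
theorem sublist_finder_spec : Claim_equal_sublist_finder := by
  intro lst span start_ptr _hDom hPre
  unfold Spec_sublist_finder sublist_finder sublist_finder_alt
  have hPre' : 0 ≤ start_ptr := hPre
  have hlo : (if 0 < start_ptr then start_ptr.toNat else 0) = start_ptr.toNat := by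
    split <;> omega
  rw [hlo]
  have hres : sfLoop lst span start_ptr
      = (if start_ptr < (lst.length : Int) then
          (buildTable lst span.1 span.2 (lst.length - start_ptr.toNat)).headD [] else []) := by
    by_cases hlt : start_ptr < (lst.length : Int)
    · rw [if_pos hlt, buildTable_eq lst span (lst.length - start_ptr.toNat) (by omega)]
      rw [List.range_succ_eq_map, List.map_cons]
      simp only [List.headD_cons, Nat.add_zero]
      congr 1
      omega
    · rw [if_neg hlt]
      exact sfLoop_of_ge lst span start_ptr hlt
  by_cases h0 : start_ptr = 0
  · subst h0
    simp [hres]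
  · simp only [if_neg h0, hres, List.append_nil]
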